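-- pv_equiv track=rewrite | github.com/BuilderBenv1/brain-v | scripts/run_hand_b_internal.py | consonant_skeleton_no_suffix
-- ===== SOURCE A (Python) =====
-- EVA_MAP = [
--     ("cth","tk"),("ckh","kk"),("cph","pk"),("ch","k"),("sh","s"),
--     ("k","k"),("d","d"),("r","r"),("s","s"),("l","l"),
--     ("n","n"),("y","y"),("m","m"),("g","g"),
--     ("t","t"),("p","p"),("f","s"),("q","w"),
-- ]
--
-- SUFFIX_CHARS = "ynrmg"
--
-- def consonant_skeleton_no_suffix(word, is_line_initial=False):
--     if is_line_initial and word and word[0] in "tp" and (len(word)==1 or word[1]!="h"):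
--         word = word[1:]
--     suffix = ""
--     if word and word[-1] in SUFFIX_CHARS and len(word) > 2:
--         suffix = word[-1]
--         word = word[:-1]
--     out = []; i = 0
--     while i < len(word):
--         matched = False
--         for ev, sy in EVA_MAP:
--             if word.startswith(ev, i):
--                 out.append(sy); i += len(ev); matched = True; break
--         if not matched:
--             i += 1
--     return "".join(out), suffix
-- ===== SOURCE B (Python) =====
-- # B: a single-pass finite-state machine over the characters (pending state for
-- # "c"/"s"/"ct"/"ck"/"cp") instead of A's per-position ordered scan of the EVA table.
-- SINGLE = {"k": "k", "d": "d", "r": "r", "l": "l", "n": "n", "y": "y",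
--           "m": "m", "g": "g", "t": "t", "p": "p", "f": "s", "q": "w"}
--
-- def consonant_skeleton_no_suffix(word, is_line_initial=False):
--     if is_line_initial and word and word[0] in "tp" and (len(word) == 1 or word[1] != "h"):
--         word = word[1:]
--     suffix = ""
--     if len(word) > 2 and word[-1] in "ynrmg":
--         suffix, word = word[-1], word[:-1]
--     out = []
--     st = ""
--     for x in word:
--         if st == "c":
--             if x == "h":
--                 out.append("k"); st = ""; continue
--             if x in "tkp":
--                 st = "c" + x; continue
--             st = ""
--         elif st == "s":
--             if x == "h":
--                 out.append("s"); st = ""; continue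
--             out.append("s"); st = ""
--         elif st:  # "ct", "ck" or "cp"
--             if x == "h":
--                 out.append(st[1] + "k"); st = ""; continue
--             out.append(st[1]); st = ""
--         # state "": start a new token at x
--         if x == "c" or x == "s":
--             st = x
--         else:
--             out.append(SINGLE.get(x, ""))
--     if st == "s":
--         out.append("s")
--     elif len(st) == 2:
--         out.append(st[1])
--     return "".join(out), suffix
-- ===== Notes on version B (the rewrite author's own statement) =====
-- stated objective: faster
-- what changed: A rescans the 18-entry ordered EVA table with startswith at every position (multi-character lookahead and index jumps); B is a single per-character pass of a finite-state machine carrying a pending state (c/s/ct/ck/cp) plus a 12-entry single-character dict and a final flush, so the per-position table scan and all lookahead disappear.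
import Mathlib
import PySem

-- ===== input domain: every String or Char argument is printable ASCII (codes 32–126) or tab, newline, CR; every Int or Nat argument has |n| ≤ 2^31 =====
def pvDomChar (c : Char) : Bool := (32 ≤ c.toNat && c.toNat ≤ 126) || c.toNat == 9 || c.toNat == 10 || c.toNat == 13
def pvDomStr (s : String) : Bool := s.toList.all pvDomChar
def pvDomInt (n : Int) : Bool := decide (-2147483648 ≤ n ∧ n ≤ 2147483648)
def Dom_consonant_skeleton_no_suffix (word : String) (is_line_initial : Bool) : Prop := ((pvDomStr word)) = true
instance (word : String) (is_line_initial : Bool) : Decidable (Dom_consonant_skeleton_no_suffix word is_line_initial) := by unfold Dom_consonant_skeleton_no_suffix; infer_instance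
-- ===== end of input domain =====

-- B replaces A's per-position ordered scan of the 18-entry EVA table (with lookahead)
-- by a single per-character pass of a finite-state machine with a pending state.

-- ===== PORT A =====
-- EVA_MAP, strings kept as lists of chars
def evaMap : List (List Char × List Char) :=
  [(['c','t','h'], ['t','k']), (['c','k','h'], ['k','k']), (['c','p','h'], ['p','k']),
   (['c','h'], ['k']), (['s','h'], ['s']),
   (['k'], ['k']), (['d'], ['d']), (['r'], ['r']), (['s'], ['s']), (['l'], ['l']),
   (['n'], ['n']), (['y'], ['y']), (['m'], ['m']), (['g'], ['g']),
   (['t'], ['t']), (['p'], ['p']), (['f'], ['s']), (['q'], ['w'])]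

-- inner loop 'for ev, sy in EVA_MAP: if word.startswith(ev, i): …' on the remaining
-- suffix r = word[i:]; returns the first matching entry's replacement and its length
def evaFind (r : List Char) : List (List Char × List Char) → Option (List Char × Nat)
  | [] => none
  | (ev, sy) :: t => if PySem.Chars.startswith r ev then some (sy, ev.length) else evaFind r t

-- the 'while i < len(word)' loop; position i is carried as the remaining suffix r = word[i:];
-- fuel (initially the word length; every step consumes ≥ 1 char) only makes it total
def evaScan : Nat → List Char → List (List Char)
  | 0, _ => []
  | _, [] => []
  | fuel + 1, r =>
    match evaFind r evaMap with
    | some (sy, k) => sy :: evaScan fuel (r.drop k)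
    | none => evaScan fuel (r.drop 1)

-- if is_line_initial and word and word[0] in "tp" and (len(word)==1 or word[1]!="h"): word = word[1:]
def stripInitialA (w0 : List Char) (il : Bool) : List Char :=
  if il = true ∧ w0 ≠ [] ∧ w0.getD 0 ' ' ∈ ['t', 'p'] ∧ (w0.length = 1 ∨ w0.getD 1 ' ' ≠ 'h')
  then w0.drop 1 else w0

-- if word and word[-1] in SUFFIX_CHARS and len(word) > 2: suffix = word[-1]; word = word[:-1]
def peelA (w : List Char) : List Char × List Char :=
  if w ≠ [] ∧ w.getLastD ' ' ∈ ['y', 'n', 'r', 'm', 'g'] ∧ 2 < w.length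
  then (w.dropLast, [w.getLastD ' ']) else (w, [])

def consonant_skeleton_no_suffix (word : String) (is_line_initial : Bool) : String × String :=
  let p := peelA (stripInitialA word.toList is_line_initial)
  (String.ofList (PySem.Chars.join [] (evaScan p.1.length p.1)), String.ofList p.2)

-- ===== PORT B =====
-- Source B's SINGLE dict
def singleMap : PySem.Dict Char (List Char) :=
  { items := [('k', ['k']), ('d', ['d']), ('r', ['r']), ('l', ['l']),
              ('n', ['n']), ('y', ['y']), ('m', ['m']), ('g', ['g']),
              ('t', ['t']), ('p', ['p']), ('f', ['s']), ('q', ['w'])] }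

-- state "": start a new token at x (the shared tail of Source B's loop body)
def bFresh (out : List (List Char)) (x : Char) : List (List Char) × List Char :=
  if x = 'c' ∨ x = 's' then (out, [x])
  else (out ++ [singleMap.getD x []], [])

-- one iteration of Source B's 'for x in word' loop; the pair is (out, st)
def bLoop (p : List (List Char) × List Char) (x : Char) : List (List Char) × List Char :=
  if p.2 = ['c'] then
    if x = 'h' then (p.1 ++ [['k']], [])
    else if x = 't' ∨ x = 'k' ∨ x = 'p' then (p.1, ['c', x])
    else bFresh p.1 x
  else if p.2 = ['s'] then
    if x = 'h' then (p.1 ++ [['s']], [])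
    else bFresh (p.1 ++ [['s']]) x
  else if p.2 ≠ [] then  -- st is "ct", "ck" or "cp"; st[1] is p.2.getD 1 ' '
    if x = 'h' then (p.1 ++ [[p.2.getD 1 ' ', 'k']], [])
    else bFresh (p.1 ++ [[p.2.getD 1 ' ']]) x
  else bFresh p.1 x

-- the final flush after the loop
def bFinish (p : List (List Char) × List Char) : List (List Char) :=
  if p.2 = ['s'] then p.1 ++ [['s']]
  else if p.2.length = 2 then p.1 ++ [[p.2.getD 1 ' ']]
  else p.1

-- line-initial strip (same guard as A, written over the list's head pattern)
def stripInitialB (w : List Char) (il : Bool) : List Char :=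
  match il, w with
  | true, c :: rest =>
      if (c = 't' ∨ c = 'p') ∧ (rest = [] ∨ rest.headD ' ' ≠ 'h') then rest else c :: rest
  | _, w => w

-- suffix peel: 'suffix, word = word[-1], word[:-1]' guarded via the last element
def peelB (w : List Char) : List Char × List Char :=
  match w.getLast? with
  | some c => if 2 < w.length ∧ (c = 'y' ∨ c = 'n' ∨ c = 'r' ∨ c = 'm' ∨ c = 'g')
              then (w.dropLast, [c]) else (w, [])
  | none => (w, [])

def consonant_skeleton_no_suffix_alt (word : String) (is_line_initial : Bool) : String × String :=
  let p := peelB (stripInitialB word.toList is_line_initial)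
  (String.ofList (PySem.Chars.join [] (bFinish (List.foldl bLoop ([], []) p.1))),
   String.ofList p.2)

-- ===== PRECONDITION & SPEC =====
def Spec_consonant_skeleton_no_suffix (word : String) (is_line_initial : Bool) (out : String × String) : Prop := out = consonant_skeleton_no_suffix_alt word is_line_initial
instance (word : String) (is_line_initial : Bool) (out : String × String) : Decidable (Spec_consonant_skeleton_no_suffix word is_line_initial out) := by unfold Spec_consonant_skeleton_no_suffix; infer_instance

-- ===== CLAIM (what is proved, stated in full; the proofs are below) =====
def Claim_equal_consonant_skeleton_no_suffix : Prop := ∀ (word : String) (is_line_initial : Bool), Dom_consonant_skeleton_no_suffix word is_line_initial → Spec_consonant_skeleton_no_suffix word is_line_initial (consonant_skeleton_no_suffix word is_line_initial)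

-- ===== LEMMAS AND PROOFS =====

lemma join_nil_cons (a : List Char) (l : List (List Char)) :
    PySem.Chars.join [] (a :: l) = a ++ PySem.Chars.join [] l := by
  cases l with
  | nil => simp [PySem.Chars.join_singleton, PySem.Chars.join_nil]
  | cons b t => simp [PySem.Chars.join_cons_cons]

lemma stripInitialB_eq (w : List Char) (il : Bool) : stripInitialB w il = stripInitialA w il := by
  cases il with
  | false => cases w <;> simp [stripInitialA, stripInitialB]
  | true =>
    cases w with
    | nil => simp [stripInitialA, stripInitialB]
    | cons c rest =>
      cases rest with
      | nil => simp [stripInitialA, stripInitialB]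
      | cons d t => simp [stripInitialA, stripInitialB]

lemma peelB_eq (w : List Char) : peelB w = peelA w := by
  unfold peelA peelB
  cases hw : w.getLast? with
  | none =>
    have h0 : w = [] := List.getLast?_eq_none_iff.mp hw
    subst h0; simp
  | some c =>
    have hne : w ≠ [] := by rintro rfl; simp at hw
    have hld : w.getLastD ' ' = c := by simp [List.getLastD_eq_getLast?, hw]
    rw [hld]
    show (if 2 < w.length ∧ (c = 'y' ∨ c = 'n' ∨ c = 'r' ∨ c = 'm' ∨ c = 'g')
          then (w.dropLast, [c]) else (w, [])) = _
    by_cases h : 2 < w.length ∧ (c = 'y' ∨ c = 'n' ∨ c = 'r' ∨ c = 'm' ∨ c = 'g')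
    · rw [if_pos h, if_pos ⟨hne, by simpa using h.2, h.1⟩]
    · rw [if_neg h, if_neg (fun hc => h ⟨hc.2.2, by simpa using hc.2.1⟩)]

lemma evaScan_nil (f : Nat) : evaScan f [] = [] := by cases f <;> simp [evaScan]

-- one bLoop step only appends to out
lemma bLoop_split (st : List Char) (x : Char) (out : List (List Char)) :
    bLoop (out, st) x = (out ++ (bLoop ([], st) x).1, (bLoop ([], st) x).2) := by
  unfold bLoop bFresh
  split_ifs <;> simp_all

-- the whole fold only appends to out
lemma foldl_bLoop_split : ∀ (r : List Char) (out : List (List Char)) (st : List Char),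
    List.foldl bLoop (out, st) r =
      (out ++ (List.foldl bLoop ([], st) r).1, (List.foldl bLoop ([], st) r).2) := by
  intro r
  induction r with
  | nil => intro out st; simp
  | cons x t ih =>
    intro out st
    rcases heq : bLoop ([], st) x with ⟨e1, e2⟩
    show List.foldl bLoop (bLoop (out, st) x) t = (out ++ (List.foldl bLoop (bLoop ([], st) x) t).1, (List.foldl bLoop (bLoop ([], st) x) t).2)
    rw [bLoop_split st x out, heq, ih (out ++ e1) e2, ih e1 e2]
    simp

lemma bFinish_split (a b : List (List Char)) (st : List Char) :
    bFinish (a ++ b, st) = a ++ bFinish (b, st) := by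
  unfold bFinish; split_ifs <;> simp

-- the admissible FSM states
def St (st : List Char) : Prop :=
  st = [] ∨ st = ['c'] ∨ st = ['s'] ∨ st = ['c','t'] ∨ st = ['c','k'] ∨ st = ['c','p']

lemma join_append (a b : List (List Char)) :
    PySem.Chars.join [] (a ++ b) = PySem.Chars.join [] a ++ PySem.Chars.join [] b := by
  induction a with
  | nil => simp [PySem.Chars.join_nil]
  | cons x t ih => simp [join_nil_cons, ih]

-- pull an already-emitted prefix out of the fold
lemma foldl_out (e : List (List Char)) (st t : List Char) :
    PySem.Chars.join [] (bFinish (List.foldl bLoop (e, st) t)) =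
      PySem.Chars.join [] e ++ PySem.Chars.join [] (bFinish (List.foldl bLoop ([], st) t)) := by
  rw [foldl_bLoop_split, bFinish_split, join_append]

-- A's table scan on a character the multi-character entries cannot start with is
-- exactly Source B's single-character dict lookup
lemma evaFind_singles (c : Char) (rest : List Char) (hc : ¬ 'c' = c) (hs : ¬ 's' = c) :
    evaFind (c :: rest) evaMap = (PySem.Dict.get? singleMap c).map (fun v => (v, 1)) := by
  by_cases h0 : 'k' = c
  · subst h0
    simp [evaFind, evaMap, singleMap, PySem.Chars.startswith, List.isPrefixOf, PySem.Dict.get?, List.find?]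
  by_cases h1 : 'd' = c
  · subst h1
    simp [evaFind, evaMap, singleMap, PySem.Chars.startswith, List.isPrefixOf, PySem.Dict.get?, List.find?]
  by_cases h2 : 'r' = c
  · subst h2
    simp [evaFind, evaMap, singleMap, PySem.Chars.startswith, List.isPrefixOf, PySem.Dict.get?, List.find?]
  by_cases h3 : 'l' = c
  · subst h3
    simp [evaFind, evaMap, singleMap, PySem.Chars.startswith, List.isPrefixOf, PySem.Dict.get?, List.find?]
  by_cases h4 : 'n' = c
  · subst h4
    simp [evaFind, evaMap, singleMap, PySem.Chars.startswith, List.isPrefixOf, PySem.Dict.get?, List.find?]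
  by_cases h5 : 'y' = c
  · subst h5
    simp [evaFind, evaMap, singleMap, PySem.Chars.startswith, List.isPrefixOf, PySem.Dict.get?, List.find?]
  by_cases h6 : 'm' = c
  · subst h6
    simp [evaFind, evaMap, singleMap, PySem.Chars.startswith, List.isPrefixOf, PySem.Dict.get?, List.find?]
  by_cases h7 : 'g' = c
  · subst h7
    simp [evaFind, evaMap, singleMap, PySem.Chars.startswith, List.isPrefixOf, PySem.Dict.get?, List.find?]
  by_cases h8 : 't' = c
  · subst h8
    simp [evaFind, evaMap, singleMap, PySem.Chars.startswith, List.isPrefixOf, PySem.Dict.get?, List.find?]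
  by_cases h9 : 'p' = c
  · subst h9
    simp [evaFind, evaMap, singleMap, PySem.Chars.startswith, List.isPrefixOf, PySem.Dict.get?, List.find?]
  by_cases h10 : 'f' = c
  · subst h10
    simp [evaFind, evaMap, singleMap, PySem.Chars.startswith, List.isPrefixOf, PySem.Dict.get?, List.find?]
  by_cases h11 : 'q' = c
  · subst h11
    simp [evaFind, evaMap, singleMap, PySem.Chars.startswith, List.isPrefixOf, PySem.Dict.get?, List.find?]
  have e0 : ('c' == c) = false := by simp [hc]
  have e1 : ('s' == c) = false := by simp [hs]
  have e2 : ('k' == c) = false := by simp [h0]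
  have e3 : ('d' == c) = false := by simp [h1]
  have e4 : ('r' == c) = false := by simp [h2]
  have e5 : ('l' == c) = false := by simp [h3]
  have e6 : ('n' == c) = false := by simp [h4]
  have e7 : ('y' == c) = false := by simp [h5]
  have e8 : ('m' == c) = false := by simp [h6]
  have e9 : ('g' == c) = false := by simp [h7]
  have e10 : ('t' == c) = false := by simp [h8]
  have e11 : ('p' == c) = false := by simp [h9]
  have e12 : ('f' == c) = false := by simp [h10]
  have e13 : ('q' == c) = false := by simp [h11]
  simp [evaFind, evaMap, singleMap, PySem.Chars.startswith, List.isPrefixOf, PySem.Dict.get?, List.find?, e0, e1, e2, e3, e4, e5, e6, e7, e8, e9, e10, e11, e12, e13]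

-- main invariant: the FSM run from pending state st on the rest r of the word emits
-- exactly what A's table scan emits on st ++ r
lemma fsm_inv : ∀ (r st : List Char) (fuel : Nat), St st → (st ++ r).length ≤ fuel →
    PySem.Chars.join [] (bFinish (List.foldl bLoop ([], st) r)) =
      PySem.Chars.join [] (evaScan fuel (st ++ r)) := by
  intro r
  induction r with
  | nil =>
    intro st fuel hst hlen
    simp only [List.length_append, List.length_nil, List.append_nil] at hlen
    rcases hst with rfl | rfl | rfl | rfl | rfl | rfl
    · simp [bFinish, evaScan_nil]
    · obtain ⟨ m, rfl ⟩ : ∃ m, fuel = m + 1 := ⟨ fuel - 1, by simp at hlen; omega ⟩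
      simp [bFinish, evaScan, evaFind, evaMap, PySem.Chars.startswith, List.isPrefixOf, evaScan_nil]
    · obtain ⟨ m, rfl ⟩ : ∃ m, fuel = m + 1 := ⟨ fuel - 1, by simp at hlen; omega ⟩
      simp [bFinish, evaScan, evaFind, evaMap, PySem.Chars.startswith, List.isPrefixOf, evaScan_nil, join_nil_cons]
    · obtain ⟨ m, rfl ⟩ : ∃ m, fuel = m + 2 := ⟨ fuel - 2, by simp at hlen; omega ⟩
      simp [bFinish, evaScan, evaFind, evaMap, PySem.Chars.startswith, List.isPrefixOf, evaScan_nil, join_nil_cons]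
    · obtain ⟨ m, rfl ⟩ : ∃ m, fuel = m + 2 := ⟨ fuel - 2, by simp at hlen; omega ⟩
      simp [bFinish, evaScan, evaFind, evaMap, PySem.Chars.startswith, List.isPrefixOf, evaScan_nil, join_nil_cons]
    · obtain ⟨ m, rfl ⟩ : ∃ m, fuel = m + 2 := ⟨ fuel - 2, by simp at hlen; omega ⟩
      simp [bFinish, evaScan, evaFind, evaMap, PySem.Chars.startswith, List.isPrefixOf, evaScan_nil, join_nil_cons]
  | cons x t ih =>
    intro st fuel hst hlen
    simp only [List.length_append, List.length_cons, List.length_nil] at hlen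
    rcases hst with rfl | rfl | rfl | rfl | rfl | rfl
    · -- st = []
      simp only [List.length_cons, List.length_nil] at hlen
      rw [List.foldl_cons]
      by_cases hxc : x = 'c'
      · subst hxc
        have hb : bLoop (([] : List (List Char)), ([] : List Char)) 'c' = ([], ['c']) := by
          simp [bLoop, bFresh]
        rw [hb, ih ['c'] fuel (by simp [St]) (by simp; omega)]
        simp
      · by_cases hxs : x = 's'
        · subst hxs
          have hb : bLoop (([] : List (List Char)), ([] : List Char)) 's' = ([], ['s']) := by
            simp [bLoop, bFresh]
          rw [hb, ih ['s'] fuel (by simp [St]) (by simp; omega)]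
          simp
        · have hc' : ¬ 'c' = x := fun h => hxc h.symm
          have hs' : ¬ 's' = x := fun h => hxs h.symm
          have hfind := evaFind_singles x t hc' hs'
          obtain ⟨m, rfl⟩ : ∃ m, fuel = m + 1 := ⟨fuel - 1, by omega⟩
          have hb : bLoop (([] : List (List Char)), ([] : List Char)) x = ([singleMap.getD x []], []) := by
            simp [bLoop, bFresh, hxc, hxs]
          rw [hb, foldl_out, ih [] m (by simp [St]) (by simp; omega)]
          rcases hget : PySem.Dict.get? singleMap x with _ | v
          · have hgd : singleMap.getD x [] = [] := by simp [PySem.Dict.getD, hget]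
            rw [hget] at hfind
            simp [hgd, evaScan, hfind]
          · have hgd : singleMap.getD x [] = v := by simp [PySem.Dict.getD, hget]
            rw [hget] at hfind
            simp [hgd, evaScan, hfind, join_nil_cons, PySem.Chars.join_singleton]
    · -- st = ['c']
      simp only [List.length_cons, List.length_nil] at hlen
      rw [List.foldl_cons]
      by_cases hxh : x = 'h'
      · subst hxh
        have hb : bLoop (([] : List (List Char)), ['c']) 'h' = ([['k']], []) := by simp [bLoop]
        obtain ⟨m, rfl⟩ : ∃ m, fuel = m + 1 := ⟨fuel - 1, by omega⟩
        have hfind : evaFind ('c' :: 'h' :: t) evaMap = some (['k'], 2) := by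
          simp [evaFind, evaMap, PySem.Chars.startswith, List.isPrefixOf]
        rw [hb, foldl_out, ih [] m (by simp [St]) (by simp; omega)]
        simp [evaScan, hfind, join_nil_cons, PySem.Chars.join_singleton]
      · by_cases hx3 : x = 't' ∨ x = 'k' ∨ x = 'p'
        · rcases hx3 with rfl | rfl | rfl
          · have hb : bLoop (([] : List (List Char)), ['c']) 't' = ([], ['c', 't']) := by
              simp [bLoop]
            rw [hb, ih ['c','t'] fuel (by simp [St]) (by simp; omega)]; simp
          · have hb : bLoop (([] : List (List Char)), ['c']) 'k' = ([], ['c', 'k']) := by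
              simp [bLoop]
            rw [hb, ih ['c','k'] fuel (by simp [St]) (by simp; omega)]; simp
          · have hb : bLoop (([] : List (List Char)), ['c']) 'p' = ([], ['c', 'p']) := by
              simp [bLoop]
            rw [hb, ih ['c','p'] fuel (by simp [St]) (by simp; omega)]; simp
        · push_neg at hx3
          obtain ⟨hxt, hxk, hxp⟩ := hx3
          have eh : ('h' == x) = false := by
            simp only [beq_eq_false_iff_ne, ne_eq]; exact fun h => hxh h.symm
          have et : ('t' == x) = false := by
            simp only [beq_eq_false_iff_ne, ne_eq]; exact fun h => hxt h.symm
          have ek : ('k' == x) = false := by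
            simp only [beq_eq_false_iff_ne, ne_eq]; exact fun h => hxk h.symm
          have ep : ('p' == x) = false := by
            simp only [beq_eq_false_iff_ne, ne_eq]; exact fun h => hxp h.symm
          have hfindc : evaFind ('c' :: x :: t) evaMap = none := by
            simp [evaFind, evaMap, PySem.Chars.startswith, List.isPrefixOf, eh, et, ek, ep]
          by_cases hxc : x = 'c'
          · subst hxc
            have hb : bLoop (([] : List (List Char)), ['c']) 'c' = ([], ['c']) := by
              simp [bLoop, bFresh]
            obtain ⟨m, rfl⟩ : ∃ m, fuel = m + 1 := ⟨fuel - 1, by omega⟩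
            rw [hb, ih ['c'] m (by simp [St]) (by simp; omega)]
            simp [evaScan, hfindc]
          · by_cases hxs : x = 's'
            · subst hxs
              have hb : bLoop (([] : List (List Char)), ['c']) 's' = ([], ['s']) := by
                simp [bLoop, bFresh]
              obtain ⟨m, rfl⟩ : ∃ m, fuel = m + 1 := ⟨fuel - 1, by omega⟩
              rw [hb, ih ['s'] m (by simp [St]) (by simp; omega)]
              simp [evaScan, hfindc]
            · have hc' : ¬ 'c' = x := fun h => hxc h.symm
              have hs' : ¬ 's' = x := fun h => hxs h.symm
              have hfind := evaFind_singles x t hc' hs'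
              obtain ⟨m, rfl⟩ : ∃ m, fuel = m + 2 := ⟨fuel - 2, by omega⟩
              have hb : bLoop (([] : List (List Char)), ['c']) x = ([singleMap.getD x []], []) := by
                simp [bLoop, bFresh, hxh, hxt, hxk, hxp, hxc, hxs]
              rw [hb, foldl_out, ih [] m (by simp [St]) (by simp; omega)]
              rcases hget : PySem.Dict.get? singleMap x with _ | v
              · have hgd : singleMap.getD x [] = [] := by simp [PySem.Dict.getD, hget]
                rw [hget] at hfind
                simp [hgd, evaScan, hfindc, hfind]
              · have hgd : singleMap.getD x [] = v := by simp [PySem.Dict.getD, hget]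
                rw [hget] at hfind
                simp [hgd, evaScan, hfindc, hfind, join_nil_cons, PySem.Chars.join_singleton]
    · -- st = ['s']
      simp only [List.length_cons, List.length_nil] at hlen
      rw [List.foldl_cons]
      by_cases hxh : x = 'h'
      · subst hxh
        have hb : bLoop (([] : List (List Char)), ['s']) 'h' = ([['s']], []) := by simp [bLoop]
        obtain ⟨m, rfl⟩ : ∃ m, fuel = m + 1 := ⟨fuel - 1, by omega⟩
        have hfind : evaFind ('s' :: 'h' :: t) evaMap = some (['s'], 2) := by
          simp [evaFind, evaMap, PySem.Chars.startswith, List.isPrefixOf]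
        rw [hb, foldl_out, ih [] m (by simp [St]) (by simp; omega)]
        simp [evaScan, hfind, join_nil_cons, PySem.Chars.join_singleton]
      · have eh : ('h' == x) = false := by
          simp only [beq_eq_false_iff_ne, ne_eq]; exact fun h => hxh h.symm
        have hfinds : evaFind ('s' :: x :: t) evaMap = some (['s'], 1) := by
          simp [evaFind, evaMap, PySem.Chars.startswith, List.isPrefixOf, eh]
        by_cases hxc : x = 'c'
        · subst hxc
          have hb : bLoop (([] : List (List Char)), ['s']) 'c' = ([['s']], ['c']) := by
            simp [bLoop, bFresh]
          obtain ⟨m, rfl⟩ : ∃ m, fuel = m + 1 := ⟨fuel - 1, by omega⟩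
          rw [hb, foldl_out, ih ['c'] m (by simp [St]) (by simp; omega)]
          simp [evaScan, hfinds, join_nil_cons, PySem.Chars.join_singleton]
        · by_cases hxs : x = 's'
          · subst hxs
            have hb : bLoop (([] : List (List Char)), ['s']) 's' = ([['s']], ['s']) := by
              simp [bLoop, bFresh]
            obtain ⟨m, rfl⟩ : ∃ m, fuel = m + 1 := ⟨fuel - 1, by omega⟩
            rw [hb, foldl_out, ih ['s'] m (by simp [St]) (by simp; omega)]
            simp [evaScan, hfinds, join_nil_cons, PySem.Chars.join_singleton]
          · have hc' : ¬ 'c' = x := fun h => hxc h.symm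
            have hs' : ¬ 's' = x := fun h => hxs h.symm
            have hfind := evaFind_singles x t hc' hs'
            obtain ⟨m, rfl⟩ : ∃ m, fuel = m + 2 := ⟨fuel - 2, by omega⟩
            have hb : bLoop (([] : List (List Char)), ['s']) x = ([['s'], singleMap.getD x []], []) := by
              simp [bLoop, bFresh, hxh, hxc, hxs]
            rw [hb, foldl_out, ih [] m (by simp [St]) (by simp; omega)]
            rcases hget : PySem.Dict.get? singleMap x with _ | v
            · have hgd : singleMap.getD x [] = [] := by simp [PySem.Dict.getD, hget]
              rw [hget] at hfind
              simp [hgd, evaScan, hfinds, hfind, join_nil_cons, PySem.Chars.join_singleton]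
            · have hgd : singleMap.getD x [] = v := by simp [PySem.Dict.getD, hget]
              rw [hget] at hfind
              simp [hgd, evaScan, hfinds, hfind, join_nil_cons, PySem.Chars.join_singleton]
    · -- st = ['c','t']
      simp only [List.length_cons, List.length_nil] at hlen
      rw [List.foldl_cons]
      by_cases hxh : x = 'h'
      · subst hxh
        have hb : bLoop (([] : List (List Char)), ['c','t']) 'h' = ([['t','k']], []) := by
          simp [bLoop]
        obtain ⟨m, rfl⟩ : ∃ m, fuel = m + 1 := ⟨fuel - 1, by omega⟩
        have hfind : evaFind ('c' :: 't' :: 'h' :: t) evaMap = some (['t','k'], 3) := by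
          simp [evaFind, evaMap, PySem.Chars.startswith, List.isPrefixOf]
        rw [hb, foldl_out, ih [] m (by simp [St]) (by simp; omega)]
        simp [evaScan, hfind, join_nil_cons, PySem.Chars.join_singleton]
      · have eh : ('h' == x) = false := by
          simp only [beq_eq_false_iff_ne, ne_eq]; exact fun h => hxh h.symm
        have hf1 : evaFind ('c' :: 't' :: x :: t) evaMap = none := by
          simp [evaFind, evaMap, PySem.Chars.startswith, List.isPrefixOf, eh]
        have hf2 : evaFind ('t' :: x :: t) evaMap = some (['t'], 1) := by
          simp [evaFind, evaMap, PySem.Chars.startswith, List.isPrefixOf]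
        by_cases hxc : x = 'c'
        · subst hxc
          have hb : bLoop (([] : List (List Char)), ['c','t']) 'c' = ([['t']], ['c']) := by
            simp [bLoop, bFresh]
          obtain ⟨m, rfl⟩ : ∃ m, fuel = m + 2 := ⟨fuel - 2, by omega⟩
          rw [hb, foldl_out, ih ['c'] m (by simp [St]) (by simp; omega)]
          simp [evaScan, hf1, hf2, join_nil_cons, PySem.Chars.join_singleton]
        · by_cases hxs : x = 's'
          · subst hxs
            have hb : bLoop (([] : List (List Char)), ['c','t']) 's' = ([['t']], ['s']) := by
              simp [bLoop, bFresh]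
            obtain ⟨m, rfl⟩ : ∃ m, fuel = m + 2 := ⟨fuel - 2, by omega⟩
            rw [hb, foldl_out, ih ['s'] m (by simp [St]) (by simp; omega)]
            simp [evaScan, hf1, hf2, join_nil_cons, PySem.Chars.join_singleton]
          · have hc' : ¬ 'c' = x := fun h => hxc h.symm
            have hs' : ¬ 's' = x := fun h => hxs h.symm
            have hfind := evaFind_singles x t hc' hs'
            obtain ⟨m, rfl⟩ : ∃ m, fuel = m + 3 := ⟨fuel - 3, by omega⟩
            have hb : bLoop (([] : List (List Char)), ['c','t']) x = ([['t'], singleMap.getD x []], []) := by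
              simp [bLoop, bFresh, hxh, hxc, hxs]
            rw [hb, foldl_out, ih [] m (by simp [St]) (by simp; omega)]
            rcases hget : PySem.Dict.get? singleMap x with _ | v
            · have hgd : singleMap.getD x [] = [] := by simp [PySem.Dict.getD, hget]
              rw [hget] at hfind
              simp [hgd, evaScan, hf1, hf2, hfind, join_nil_cons, PySem.Chars.join_singleton]
            · have hgd : singleMap.getD x [] = v := by simp [PySem.Dict.getD, hget]
              rw [hget] at hfind
              simp [hgd, evaScan, hf1, hf2, hfind, join_nil_cons, PySem.Chars.join_singleton]
    · -- st = ['c','k']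
      simp only [List.length_cons, List.length_nil] at hlen
      rw [List.foldl_cons]
      by_cases hxh : x = 'h'
      · subst hxh
        have hb : bLoop (([] : List (List Char)), ['c','k']) 'h' = ([['k','k']], []) := by
          simp [bLoop]
        obtain ⟨m, rfl⟩ : ∃ m, fuel = m + 1 := ⟨fuel - 1, by omega⟩
        have hfind : evaFind ('c' :: 'k' :: 'h' :: t) evaMap = some (['k','k'], 3) := by
          simp [evaFind, evaMap, PySem.Chars.startswith, List.isPrefixOf]
        rw [hb, foldl_out, ih [] m (by simp [St]) (by simp; omega)]
        simp [evaScan, hfind, join_nil_cons, PySem.Chars.join_singleton]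
      · have eh : ('h' == x) = false := by
          simp only [beq_eq_false_iff_ne, ne_eq]; exact fun h => hxh h.symm
        have hf1 : evaFind ('c' :: 'k' :: x :: t) evaMap = none := by
          simp [evaFind, evaMap, PySem.Chars.startswith, List.isPrefixOf, eh]
        have hf2 : evaFind ('k' :: x :: t) evaMap = some (['k'], 1) := by
          simp [evaFind, evaMap, PySem.Chars.startswith, List.isPrefixOf]
        by_cases hxc : x = 'c'
        · subst hxc
          have hb : bLoop (([] : List (List Char)), ['c','k']) 'c' = ([['k']], ['c']) := by
            simp [bLoop, bFresh]
          obtain ⟨m, rfl⟩ : ∃ m, fuel = m + 2 := ⟨fuel - 2, by omega⟩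
          rw [hb, foldl_out, ih ['c'] m (by simp [St]) (by simp; omega)]
          simp [evaScan, hf1, hf2, join_nil_cons, PySem.Chars.join_singleton]
        · by_cases hxs : x = 's'
          · subst hxs
            have hb : bLoop (([] : List (List Char)), ['c','k']) 's' = ([['k']], ['s']) := by
              simp [bLoop, bFresh]
            obtain ⟨m, rfl⟩ : ∃ m, fuel = m + 2 := ⟨fuel - 2, by omega⟩
            rw [hb, foldl_out, ih ['s'] m (by simp [St]) (by simp; omega)]
            simp [evaScan, hf1, hf2, join_nil_cons, PySem.Chars.join_singleton]
          · have hc' : ¬ 'c' = x := fun h => hxc h.symm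
            have hs' : ¬ 's' = x := fun h => hxs h.symm
            have hfind := evaFind_singles x t hc' hs'
            obtain ⟨m, rfl⟩ : ∃ m, fuel = m + 3 := ⟨fuel - 3, by omega⟩
            have hb : bLoop (([] : List (List Char)), ['c','k']) x = ([['k'], singleMap.getD x []], []) := by
              simp [bLoop, bFresh, hxh, hxc, hxs]
            rw [hb, foldl_out, ih [] m (by simp [St]) (by simp; omega)]
            rcases hget : PySem.Dict.get? singleMap x with _ | v
            · have hgd : singleMap.getD x [] = [] := by simp [PySem.Dict.getD, hget]
              rw [hget] at hfind
              simp [hgd, evaScan, hf1, hf2, hfind, join_nil_cons, PySem.Chars.join_singleton]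
            · have hgd : singleMap.getD x [] = v := by simp [PySem.Dict.getD, hget]
              rw [hget] at hfind
              simp [hgd, evaScan, hf1, hf2, hfind, join_nil_cons, PySem.Chars.join_singleton]
    · -- st = ['c','p']
      simp only [List.length_cons, List.length_nil] at hlen
      rw [List.foldl_cons]
      by_cases hxh : x = 'h'
      · subst hxh
        have hb : bLoop (([] : List (List Char)), ['c','p']) 'h' = ([['p','k']], []) := by
          simp [bLoop]
        obtain ⟨m, rfl⟩ : ∃ m, fuel = m + 1 := ⟨fuel - 1, by omega⟩
        have hfind : evaFind ('c' :: 'p' :: 'h' :: t) evaMap = some (['p','k'], 3) := by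
          simp [evaFind, evaMap, PySem.Chars.startswith, List.isPrefixOf]
        rw [hb, foldl_out, ih [] m (by simp [St]) (by simp; omega)]
        simp [evaScan, hfind, join_nil_cons, PySem.Chars.join_singleton]
      · have eh : ('h' == x) = false := by
          simp only [beq_eq_false_iff_ne, ne_eq]; exact fun h => hxh h.symm
        have hf1 : evaFind ('c' :: 'p' :: x :: t) evaMap = none := by
          simp [evaFind, evaMap, PySem.Chars.startswith, List.isPrefixOf, eh]
        have hf2 : evaFind ('p' :: x :: t) evaMap = some (['p'], 1) := by
          simp [evaFind, evaMap, PySem.Chars.startswith, List.isPrefixOf]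
        by_cases hxc : x = 'c'
        · subst hxc
          have hb : bLoop (([] : List (List Char)), ['c','p']) 'c' = ([['p']], ['c']) := by
            simp [bLoop, bFresh]
          obtain ⟨m, rfl⟩ : ∃ m, fuel = m + 2 := ⟨fuel - 2, by omega⟩
          rw [hb, foldl_out, ih ['c'] m (by simp [St]) (by simp; omega)]
          simp [evaScan, hf1, hf2, join_nil_cons, PySem.Chars.join_singleton]
        · by_cases hxs : x = 's'
          · subst hxs
            have hb : bLoop (([] : List (List Char)), ['c','p']) 's' = ([['p']], ['s']) := by
              simp [bLoop, bFresh]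
            obtain ⟨m, rfl⟩ : ∃ m, fuel = m + 2 := ⟨fuel - 2, by omega⟩
            rw [hb, foldl_out, ih ['s'] m (by simp [St]) (by simp; omega)]
            simp [evaScan, hf1, hf2, join_nil_cons, PySem.Chars.join_singleton]
          · have hc' : ¬ 'c' = x := fun h => hxc h.symm
            have hs' : ¬ 's' = x := fun h => hxs h.symm
            have hfind := evaFind_singles x t hc' hs'
            obtain ⟨m, rfl⟩ : ∃ m, fuel = m + 3 := ⟨fuel - 3, by omega⟩
            have hb : bLoop (([] : List (List Char)), ['c','p']) x = ([['p'], singleMap.getD x []], []) := by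
              simp [bLoop, bFresh, hxh, hxc, hxs]
            rw [hb, foldl_out, ih [] m (by simp [St]) (by simp; omega)]
            rcases hget : PySem.Dict.get? singleMap x with _ | v
            · have hgd : singleMap.getD x [] = [] := by simp [PySem.Dict.getD, hget]
              rw [hget] at hfind
              simp [hgd, evaScan, hf1, hf2, hfind, join_nil_cons, PySem.Chars.join_singleton]
            · have hgd : singleMap.getD x [] = v := by simp [PySem.Dict.getD, hget]
              rw [hget] at hfind
              simp [hgd, evaScan, hf1, hf2, hfind, join_nil_cons, PySem.Chars.join_singleton]

-- B's run on the whole (stripped, peeled) word equals A's table scan on it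
lemma join_fsm_eq (r : List Char) :
    PySem.Chars.join [] (bFinish (List.foldl bLoop ([], []) r)) =
      PySem.Chars.join [] (evaScan r.length r) :=
  fsm_inv r [] r.length (Or.inl rfl) (by simp)

-- ===== VERDICT (by name: the statement is the Claim_ definition above) =====
theorem consonant_skeleton_no_suffix_spec : Claim_equal_consonant_skeleton_no_suffix := by
  intro word il _
  unfold Spec_consonant_skeleton_no_suffix
  simp only [consonant_skeleton_no_suffix, consonant_skeleton_no_suffix_alt,
    stripInitialB_eq, peelB_eq, join_fsm_eq]
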